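-- pv_equiv track=rewrite | github.com/sw1029/nf | tools/bench/build_novel_dataset.py | _select_boundary_patterns
-- ===== SOURCE A (Python) =====
-- _PATTERN_NAMES = (
--     "bracket",
--     "episode_hwa",
--     "angle_episode_hwa",
--     "title_number_hwa",
--     "ep_prefix",
--     "bracketed_numbered_title",
--     "section_jo",
--     "chapter_jang",
--     "prologue_header",
--     "numbered_title",
--     "angle_title_paren",
--     "plain_title_paren",
--     "standalone_number",
--     "trailing_dash",
-- )
--
-- def _select_boundary_patterns(candidate_counts: dict[str, int]) -> set[str]:
--     ranked = sorted(
--         ((name, int(candidate_counts.get(name, 0))) for name in _PATTERN_NAMES),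
--         key=lambda item: item[1],
--         reverse=True,
--     )
--     top_name, top_count = ranked[0]
--     second_name, second_count = ranked[1]
--     if top_count < 2:
--         return set()
--     high_conf_episode_family = {
--         "bracket",
--         "episode_hwa",
--         "angle_episode_hwa",
--         "title_number_hwa",
--         "ep_prefix",
--         "bracketed_numbered_title",
--         "section_jo",
--     }
--     title_family = {"numbered_title", "angle_title_paren", "plain_title_paren"}
--     if any(int(candidate_counts.get(name, 0)) >= 2 for name in high_conf_episode_family):
--         return {name for name in high_conf_episode_family if int(candidate_counts.get(name, 0)) > 0}
--     if any(int(candidate_counts.get(name, 0)) >= 2 for name in title_family):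
--         return {name for name in title_family if int(candidate_counts.get(name, 0)) > 0}
--     if (
--         top_name in {"episode_hwa", "bracket"}
--         and second_name in {"episode_hwa", "bracket"}
--         and second_count >= 2
--         and top_count < int(second_count * 1.5)
--     ):
--         return {top_name, second_name}
--     if top_count >= max(2, int(second_count * 1.5)):
--         return {top_name}
--     return {name for name, count in ranked if count >= 2}
-- ===== SOURCE B (Python) =====
-- _PATTERN_NAMES = (
--     "bracket",
--     "episode_hwa",
--     "angle_episode_hwa",
--     "title_number_hwa",
--     "ep_prefix",
--     "bracketed_numbered_title",
--     "section_jo",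
--     "chapter_jang",
--     "prologue_header",
--     "numbered_title",
--     "angle_title_paren",
--     "plain_title_paren",
--     "standalone_number",
--     "trailing_dash",
-- )
--
-- _HIGH_CONF_FAMILY = (
--     "bracket",
--     "episode_hwa",
--     "angle_episode_hwa",
--     "title_number_hwa",
--     "ep_prefix",
--     "bracketed_numbered_title",
--     "section_jo",
-- )
--
-- _TITLE_FAMILY = ("numbered_title", "angle_title_paren", "plain_title_paren")
--
--
-- def _select_boundary_patterns(candidate_counts: dict[str, int]) -> set[str]:
--     # One linear pass keeping the top-two (name, count) entries; a strictly greater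
--     # count is needed to displace an entry, so ties keep the earlier name — the same
--     # tie-breaking as a stable descending sort.
--     best = None
--     second = None
--     for name in _PATTERN_NAMES:
--         c = int(candidate_counts.get(name, 0))
--         if best is None or c > best[1]:
--             second = best
--             best = (name, c)
--         elif second is None or c > second[1]:
--             second = (name, c)
--     top_name, top_count = best
--     second_name, second_count = second
--     if top_count < 2:
--         return set()
--     if any(int(candidate_counts.get(n, 0)) >= 2 for n in _HIGH_CONF_FAMILY):
--         return {n for n in _HIGH_CONF_FAMILY if int(candidate_counts.get(n, 0)) > 0}
--     if any(int(candidate_counts.get(n, 0)) >= 2 for n in _TITLE_FAMILY):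
--         return {n for n in _TITLE_FAMILY if int(candidate_counts.get(n, 0)) > 0}
--     if (
--         top_name in ("episode_hwa", "bracket")
--         and second_name in ("episode_hwa", "bracket")
--         and second_count >= 2
--         and top_count < int(second_count * 1.5)
--     ):
--         return {top_name, second_name}
--     if top_count >= max(2, int(second_count * 1.5)):
--         return {top_name}
--     return {n for n in _PATTERN_NAMES if int(candidate_counts.get(n, 0)) >= 2}
-- ===== Notes on version B (the rewrite author's own statement) =====
-- stated objective: simpler
-- what changed: Replaces the full stable reverse sort of all 14 pattern counts by a single linear top-two selection pass (strict-greater replacement reproduces the stable sort's earliest-name tie-breaking), and builds the final fallback set by a direct filter over _PATTERN_NAMES instead of iterating the sorted ranking.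
import Mathlib
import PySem

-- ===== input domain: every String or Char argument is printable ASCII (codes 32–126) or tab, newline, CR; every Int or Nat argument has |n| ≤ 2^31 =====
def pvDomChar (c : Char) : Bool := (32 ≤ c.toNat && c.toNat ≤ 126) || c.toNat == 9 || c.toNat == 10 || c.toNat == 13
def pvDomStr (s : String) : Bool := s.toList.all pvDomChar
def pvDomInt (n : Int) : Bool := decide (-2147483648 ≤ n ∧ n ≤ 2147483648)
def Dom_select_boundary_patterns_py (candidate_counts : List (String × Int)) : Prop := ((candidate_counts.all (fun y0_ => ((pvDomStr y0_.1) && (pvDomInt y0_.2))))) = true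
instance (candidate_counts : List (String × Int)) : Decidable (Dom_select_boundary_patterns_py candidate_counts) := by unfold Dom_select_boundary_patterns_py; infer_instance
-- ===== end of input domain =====

-- B replaces A's full stable reverse sort of all 14 pattern counts by a single linear
-- top-two selection pass (and builds the final fallback set directly); same results.
-- Python set values are represented as lists in the fixed _PATTERN_NAMES / family
-- literal order (a Python set's iteration order is unspecified; outputs are compared
-- as finite sets).


-- shared module-level constants and coercions (identical in Source A and Source B)

-- _PATTERN_NAMES
def pvNames : List String :=
  ["bracket", "episode_hwa", "angle_episode_hwa", "title_number_hwa", "ep_prefix",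
   "bracketed_numbered_title", "section_jo", "chapter_jang", "prologue_header",
   "numbered_title", "angle_title_paren", "plain_title_paren", "standalone_number",
   "trailing_dash"]

-- high_conf_episode_family / title_family (Python set literals, in written order)
def pvHigh : List String :=
  ["bracket", "episode_hwa", "angle_episode_hwa", "title_number_hwa", "ep_prefix",
   "bracketed_numbered_title", "section_jo"]
def pvTitle : List String := ["numbered_title", "angle_title_paren", "plain_title_paren"]

-- int(candidate_counts.get(name, 0)): int() on an int is the identity
def pvCnt (cc : List (String × Int)) (name : String) : Int := (PySem.Dict.mk cc).getD name 0  -- assoc-list lookup: first match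

-- int(c * 1.5): exact on the domain (|c| ≤ 2^31, so 3*c < 2^53 and the float product
-- 1.5*c is exact); Python's int() truncates toward zero, which is Int.tdiv by 2.
def pvTimes15 (c : Int) : Int := Int.tdiv (3 * c) 2

-- ===== PORT A =====

def select_boundary_patterns_py (candidate_counts : List (String × Int)) : List String :=
  let ranked := PySem.List.sorted
    (pvNames.map (fun name => (name, pvCnt candidate_counts name)))
    (fun item => item.2) true
  -- ranked[0] / ranked[1]: always in range, ranked has the 14 pattern entries
  let top := PySem.List.pyGetD ranked 0 ("", 0)
  let second := PySem.List.pyGetD ranked 1 ("", 0)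
  if top.2 < 2 then []
  else if pvHigh.any (fun name => 2 ≤ pvCnt candidate_counts name) then
    -- set comprehension (order unspecified): represented in the family literal's order
    pvHigh.filter (fun name => 0 < pvCnt candidate_counts name)
  else if pvTitle.any (fun name => 2 ≤ pvCnt candidate_counts name) then
    pvTitle.filter (fun name => 0 < pvCnt candidate_counts name)
  else if (top.1 = "episode_hwa" ∨ top.1 = "bracket")
       ∧ (second.1 = "episode_hwa" ∨ second.1 = "bracket")
       ∧ 2 ≤ second.2 ∧ top.2 < pvTimes15 second.2 then
    -- {top_name, second_name}: two distinct names (ranked holds 14 distinct names)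
    [top.1, second.1]
  else if max 2 (pvTimes15 second.2) ≤ top.2 then
    [top.1]
  else
    -- {name for name, count in ranked if count >= 2}: a set, represented in
    -- _PATTERN_NAMES order (ranked is a permutation of the mapped name list)
    pvNames.filter (fun name => 2 ≤ pvCnt candidate_counts name)

-- ===== PORT B =====


-- the loop body of B's top-two selection pass (best, second as Options; a strictly
-- greater count is needed to displace an entry, so ties keep the earlier name)
def pvStepB (st : Option (String × Int) × Option (String × Int)) (p : String × Int) :
    Option (String × Int) × Option (String × Int) :=
  match st with
  | (none, s) => (some p, s)
  | (some b, s) =>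
    if b.2 < p.2 then (some p, some b)
    else match s with
      | none => (some b, some p)
      | some sec => if sec.2 < p.2 then (some b, some p) else (some b, some sec)

def select_boundary_patterns_py_alt (candidate_counts : List (String × Int)) : List String :=
  let st := pvNames.foldl
    (fun st name => pvStepB st (name, pvCnt candidate_counts name)) (none, none)
  match st with
  | (some top, some second) =>
    if top.2 < 2 then []
    else if pvHigh.any (fun name => 2 ≤ pvCnt candidate_counts name) then
      pvHigh.filter (fun name => 0 < pvCnt candidate_counts name)
    else if pvTitle.any (fun name => 2 ≤ pvCnt candidate_counts name) then
      pvTitle.filter (fun name => 0 < pvCnt candidate_counts name)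
    else if (top.1 = "episode_hwa" ∨ top.1 = "bracket")
         ∧ (second.1 = "episode_hwa" ∨ second.1 = "bracket")
         ∧ 2 ≤ second.2 ∧ top.2 < pvTimes15 second.2 then
      [top.1, second.1]
    else if max 2 (pvTimes15 second.2) ≤ top.2 then
      [top.1]
    else
      pvNames.filter (fun name => 2 ≤ pvCnt candidate_counts name)
  | _ => [] -- unreachable: the loop runs over 14 names, so best and second are set

-- ===== PRECONDITION & SPEC =====
def Spec_select_boundary_patterns_py (candidate_counts : List (String × Int)) (out : List String) : Prop := out = select_boundary_patterns_py_alt candidate_counts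
instance (candidate_counts : List (String × Int)) (out : List String) : Decidable (Spec_select_boundary_patterns_py candidate_counts out) := by unfold Spec_select_boundary_patterns_py; infer_instance

-- ===== CLAIM (what is proved, stated in full; the proofs are below) =====
def Claim_equal_select_boundary_patterns_py : Prop := ∀ (candidate_counts : List (String × Int)), Dom_select_boundary_patterns_py candidate_counts → Spec_select_boundary_patterns_py candidate_counts (select_boundary_patterns_py candidate_counts)

-- ===== LEMMAS AND PROOFS =====

-- the first two elements of a list, as B's (best, second) state
def pvState2 (xs : List (String × Int)) : Option (String × Int) × Option (String × Int) :=
  match xs with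
  | [] => (none, none)
  | [a] => (some a, none)
  | a :: b :: _ => (some a, some b)

theorem pvState2_insertBy (x : String × Int) (acc : List (String × Int)) :
    pvState2 (PySem.List.insertBy (fun a b => decide (b.2 < a.2)) x acc)
      = pvStepB (pvState2 acc) x := by
  match acc with
  | [] => rfl
  | [a] =>
    simp only [PySem.List.insertBy, pvState2, pvStepB]
    by_cases h : a.2 < x.2 <;> simp [h]
  | a :: b :: rest =>
    simp only [PySem.List.insertBy, pvState2, pvStepB]
    by_cases h1 : a.2 < x.2
    · simp [h1]
    · by_cases h2 : b.2 < x.2 <;> simp [h1, h2]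

theorem pvState2_foldl (l : List (String × Int)) (acc : List (String × Int)) :
    pvState2 (l.foldl (fun acc x =>
        PySem.List.insertBy (fun a b => decide (b.2 < a.2)) x acc) acc)
      = l.foldl pvStepB (pvState2 acc) := by
  induction l generalizing acc with
  | nil => rfl
  | cons x t ih => simp only [List.foldl_cons, ih, pvState2_insertBy]

-- B's scan state = the first two entries of A's stable reverse sort
theorem pvTop2 (cc : List (String × Int)) :
    (pvNames.foldl (fun st name => pvStepB st (name, pvCnt cc name)) (none, none))
      = pvState2 (PySem.List.sorted
          (pvNames.map (fun name => (name, pvCnt cc name))) (fun item => item.2) true) := by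
  rw [PySem.List.sorted_rev_eq_foldl_insertBy, pvState2_foldl]
  show _ = (pvNames.map (fun name => (name, pvCnt cc name))).foldl pvStepB (pvState2 [])
  rw [List.foldl_map]
  rfl

theorem pvRankedLen (cc : List (String × Int)) :
    (PySem.List.sorted (pvNames.map (fun name => (name, pvCnt cc name)))
        (fun item => item.2) true).length = 14 := by
  rw [PySem.List.length_sorted, List.length_map]
  rfl

-- ===== VERDICT (by name: the statement is the Claim_ definition above) =====
theorem select_boundary_patterns_py_spec : Claim_equal_select_boundary_patterns_py := by
  intro cc _
  unfold Spec_select_boundary_patterns_py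
  unfold select_boundary_patterns_py select_boundary_patterns_py_alt
  rw [pvTop2]
  have hlen := pvRankedLen cc
  set ranked := PySem.List.sorted (pvNames.map (fun name => (name, pvCnt cc name)))
      (fun item => item.2) true with hranked
  match hr : ranked with
  | [] => simp at hlen
  | [a] => simp at hlen
  | a :: b :: rest =>
    simp only [pvState2]
    have h0 : PySem.List.pyGetD (a :: b :: rest) 0 ("", 0) = a :=
      PySem.List.pyGetD_zero_cons a (b :: rest) ("", 0)
    have h1 : PySem.List.pyGetD (a :: b :: rest) 1 ("", 0) = b := by
      have := PySem.List.pyGetD_ofNat (n := 1) (xs := a :: b :: rest) (d := ("", 0))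
        (by simp)
      simpa using this
    rw [h0, h1]
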